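-- pv_equiv track=rewrite | github.com/mikeleo03/Information-extractor-be | src/KMPPaterrn.py | PrefixSuffixInit
-- ===== SOURCE A (Python) =====
-- def PrefixSuffixInit(pattern, k):
--     prefix = []
--     suffix = []
--     for i in range (k+1):
--         presub = ""
--         sufsub = ""
--         for j in range (i+1):
--             presub = presub + pattern[j]
--             sufsub = pattern[k-j] + sufsub
--         prefix.append(presub)
--         suffix.append(sufsub)
--     suffix.pop()
--     return prefix, suffix
-- ===== SOURCE B (Python) =====
-- def PrefixSuffixInit(pattern, k):
--     prefix = []
--     suffix = []
--     cur = ""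
--     for i in range(k + 1):
--         cur = cur + pattern[i]
--         prefix.append(cur)
--     cur = ""
--     for i in range(k + 1):
--         cur = pattern[k - i] + cur
--         suffix.append(cur)
--     suffix.pop()
--     return prefix, suffix
-- ===== Notes on version B (the rewrite author's own statement) =====
-- stated objective: faster
-- what changed: Replaces the nested rebuild-from-scratch inner loop with two single passes that extend running string accumulators (append one char per step), so each substring is built incrementally instead of recomputed.
import Mathlib
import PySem

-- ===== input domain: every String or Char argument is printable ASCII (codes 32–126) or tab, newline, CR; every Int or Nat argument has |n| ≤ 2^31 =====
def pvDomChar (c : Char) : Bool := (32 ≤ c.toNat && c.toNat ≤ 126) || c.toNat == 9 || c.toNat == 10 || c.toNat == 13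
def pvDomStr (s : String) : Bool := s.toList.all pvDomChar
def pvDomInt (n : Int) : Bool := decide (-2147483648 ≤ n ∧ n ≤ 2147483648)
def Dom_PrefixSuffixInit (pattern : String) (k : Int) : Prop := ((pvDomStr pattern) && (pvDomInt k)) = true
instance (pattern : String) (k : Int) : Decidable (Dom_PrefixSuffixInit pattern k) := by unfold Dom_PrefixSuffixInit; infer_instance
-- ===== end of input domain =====

-- ===== PORT A =====
-- B changes: two single passes with running string accumulators instead of A's nested
-- rebuild-from-scratch inner loop (objective: faster by a constant factor).
-- A-side helper: the inner j-loop of A, building (presub, sufsub) for a given i.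
def aInner (pattern : String) (k i : Int) : String × String :=
  (PySem.List.pyRange 0 (i+1) 1).foldl
    (fun (ps : String × String) j =>
      (ps.1 ++ ((PySem.Str.pyGet? pattern j).getD ' ').toString,
       ((PySem.Str.pyGet? pattern (k - j)).getD ' ').toString ++ ps.2))
    ("", "")

def PrefixSuffixInit (pattern : String) (k : Int) : List String × List String :=
  let r := (PySem.List.pyRange 0 (k+1) 1).foldl
    (fun (acc : List String × List String) i =>
      let ps := aInner pattern k i
      (acc.1 ++ [ps.1], acc.2 ++ [ps.2]))
    ([], [])
  (r.1, r.2.dropLast)  -- suffix.pop(): Pre_ guarantees the list is nonempty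

-- ===== PORT B =====
def PrefixSuffixInit_alt (pattern : String) (k : Int) : List String × List String :=
  let p := (PySem.List.pyRange 0 (k+1) 1).foldl
    (fun (acc : String × List String) i =>
      let cur := acc.1 ++ ((PySem.Str.pyGet? pattern i).getD ' ').toString
      (cur, acc.2 ++ [cur]))
    ("", [])
  let s := (PySem.List.pyRange 0 (k+1) 1).foldl
    (fun (acc : String × List String) i =>
      let cur := ((PySem.Str.pyGet? pattern (k - i)).getD ' ').toString ++ acc.1
      (cur, acc.2 ++ [cur]))
    ("", [])
  (p.2, s.2.dropLast)  -- suffix.pop(): nonempty under Pre_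

-- ===== PRECONDITION & SPEC =====
-- Python A raises IndexError when k < 0 (suffix.pop() on an empty list) or when
-- k >= len(pattern) (pattern[j] out of range); exactly those inputs are excluded.
def Pre_PrefixSuffixInit (pattern : String) (k : Int) : Prop :=
  0 ≤ k ∧ k < (pattern.toList.length : Int)
instance (pattern : String) (k : Int) : Decidable (Pre_PrefixSuffixInit pattern k) := by
  unfold Pre_PrefixSuffixInit; infer_instance
def pvWitness_PrefixSuffixInit : String × Int := ("abc", 1)

def Spec_PrefixSuffixInit (pattern : String) (k : Int) (out : List String × List String) : Prop := out = PrefixSuffixInit_alt pattern k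
instance (pattern : String) (k : Int) (out : List String × List String) : Decidable (Spec_PrefixSuffixInit pattern k out) := by unfold Spec_PrefixSuffixInit; infer_instance

-- ===== CLAIM (what is proved, stated in full; the proofs are below) =====
def Claim_equal_PrefixSuffixInit : Prop := ∀ (pattern : String) (k : Int), Dom_PrefixSuffixInit pattern k → Pre_PrefixSuffixInit pattern k → Spec_PrefixSuffixInit pattern k (PrefixSuffixInit pattern k)

-- ===== LEMMAS AND PROOFS =====

-- the running prefix accumulator: preAcc n = pattern[0] + ... + pattern[n-1]
def preAcc (pattern : String) : Nat → String
  | 0 => ""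
  | n+1 => preAcc pattern n ++ ((PySem.Str.pyGet? pattern (n : Int)).getD ' ').toString

-- the running suffix accumulator: sufAcc n = pattern[k-(n-1)] + ... + pattern[k]
def sufAcc (pattern : String) (k : Int) : Nat → String
  | 0 => ""
  | n+1 => ((PySem.Str.pyGet? pattern (k - (n : Int))).getD ' ').toString ++ sufAcc pattern k n

lemma aInner_eq (pattern : String) (k : Int) (m : Nat) :
    aInner pattern k (m : Int) = (preAcc pattern (m+1), sufAcc pattern k (m+1)) := by
  induction m with
  | zero =>
      simp [aInner, PySem.List.pyRange_one, preAcc, sufAcc]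
  | succ m ih =>
      have h : PySem.List.pyRange 0 ((m+1 : Nat) + 1) 1
          = PySem.List.pyRange 0 ((m : Nat) + 1) 1 ++ [((m+1 : Nat) : Int)] := by
        have := PySem.List.pyRange_one_succ_right (a := 0) (b := ((m : Nat) + 1 : Int))
          (by positivity)
        push_cast at this ⊢
        convert this using 2
      unfold aInner at ih ⊢
      push_cast at h ⊢
      rw [h, List.foldl_append, ih]
      simp [preAcc, sufAcc]

lemma foldA_eq (pattern : String) (k : Int) (L : List Int) (xs ys : List String) :
    L.foldl (fun (acc : List String × List String) i =>
        let ps := aInner pattern k i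
        (acc.1 ++ [ps.1], acc.2 ++ [ps.2])) (xs, ys)
      = (xs ++ L.map (fun i => (aInner pattern k i).1),
         ys ++ L.map (fun i => (aInner pattern k i).2)) := by
  induction L generalizing xs ys with
  | nil => simp
  | cons a L ih => simp [ih]

lemma foldBpre_eq (pattern : String) (k : Int) (n : Nat) :
    (PySem.List.pyRange 0 (n : Int) 1).foldl
      (fun (acc : String × List String) i =>
        let cur := acc.1 ++ ((PySem.Str.pyGet? pattern i).getD ' ').toString
        (cur, acc.2 ++ [cur])) ("", [])
    = (preAcc pattern n, (List.range n).map (fun m => preAcc pattern (m+1))) := by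
  induction n with
  | zero => rw [show ((0:Nat):Int) = 0 by norm_num, PySem.List.pyRange_one_eq_nil le_rfl]; simp [preAcc]
  | succ n ih =>
      have h : PySem.List.pyRange 0 ((n : Nat) + 1) 1
          = PySem.List.pyRange 0 (n : Int) 1 ++ [(n : Int)] :=
        PySem.List.pyRange_one_succ_right (by positivity)
      push_cast at h ⊢
      rw [h, List.foldl_append, ih]
      simp [preAcc, List.range_succ]

lemma foldBsuf_eq (pattern : String) (k : Int) (n : Nat) :
    (PySem.List.pyRange 0 (n : Int) 1).foldl
      (fun (acc : String × List String) i =>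
        let cur := ((PySem.Str.pyGet? pattern (k - i)).getD ' ').toString ++ acc.1
        (cur, acc.2 ++ [cur])) ("", [])
    = (sufAcc pattern k n, (List.range n).map (fun m => sufAcc pattern k (m+1))) := by
  induction n with
  | zero => rw [show ((0:Nat):Int) = 0 by norm_num, PySem.List.pyRange_one_eq_nil le_rfl]; simp [sufAcc]
  | succ n ih =>
      have h : PySem.List.pyRange 0 ((n : Nat) + 1) 1
          = PySem.List.pyRange 0 (n : Int) 1 ++ [(n : Int)] :=
        PySem.List.pyRange_one_succ_right (by positivity)
      push_cast at h ⊢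
      rw [h, List.foldl_append, ih]
      simp [sufAcc, List.range_succ]

-- ===== VERDICT (by name: the statement is the Claim_ definition above) =====
theorem PrefixSuffixInit_spec : Claim_equal_PrefixSuffixInit := by
  intro pattern k _ _
  unfold Spec_PrefixSuffixInit PrefixSuffixInit PrefixSuffixInit_alt
  set n := (k + 1 - 0).toNat with hn
  have hr' : PySem.List.pyRange 0 (k+1) 1 = (List.range n).map (fun m : Nat => (m : Int)) := by
    rw [PySem.List.pyRange_one]; simp [hn]
  have hnr : ((n : Int)) = k + 1 ∨ n = 0 := by omega
  have hrn : PySem.List.pyRange 0 (n : Int) 1 = PySem.List.pyRange 0 (k+1) 1 := by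
    rcases hnr with h | h
    · rw [h]
    · rw [h]; rw [hr', h]; simp [PySem.List.pyRange_one_eq_nil]
  have hpre := foldBpre_eq pattern k n
  have hsuf := foldBsuf_eq pattern k n
  rw [hrn] at hpre hsuf
  simp only [foldA_eq, hpre, hsuf]
  rw [hr']
  simp [List.map_map, Function.comp_def, aInner_eq]
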